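-- pv_equiv track=rewrite | github.com/Cedian03/advent-of-code | 2024/09.py | leftmost_span
-- ===== SOURCE A (Python) =====
-- def leftmost_span(disk: list[int | None], n: int) -> int | None:
--     l = r = 0
--
--     while True:
--         while r < len(disk) and disk[r] is not None:
--             r += 1
--
--         l = r
--
--         while r < len(disk) and disk[r] is None:
--             r += 1
--
--         if r - l >= n:
--             return l
--
--         if r >= len(disk):
--             return None
-- ===== SOURCE B (Python) =====
-- def leftmost_span(disk, n):
--     # Stage 1: collect the indices of all free (None) slots.
--     # Stage 2: scan that index list for a maximal run of consecutive
--     # integers of length >= n; the run's first index is the answer.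
--     free = [i for i, x in enumerate(disk) if x is None]
--     if not free:
--         return None
--     start = free[0]
--     run = 1
--     for prev, cur in zip(free, free[1:]):
--         if run >= n:
--             return start
--         if cur == prev + 1:
--             run += 1
--         else:
--             start = cur
--             run = 1
--     return start if run >= n else None
-- ===== Notes on version B (the rewrite author's own statement) =====
-- stated objective: alternative
-- what changed: B works in two stages over a different data structure: it first materialises the list of free-slot indices, then scans that index list for a run of n consecutive integers, instead of A's two-pointer skip/count scan over the disk itself.
-- intended difference: For n <= 0 on a disk containing no None slot, A returns len(disk) (an out-of-range position, an artefact of its two-pointer loop running off the end), while B returns None, the intended not-found answer when no free slot exists. — e.g. on leftmost_span([], 0): A returns some 0, B returns none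
import Mathlib
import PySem

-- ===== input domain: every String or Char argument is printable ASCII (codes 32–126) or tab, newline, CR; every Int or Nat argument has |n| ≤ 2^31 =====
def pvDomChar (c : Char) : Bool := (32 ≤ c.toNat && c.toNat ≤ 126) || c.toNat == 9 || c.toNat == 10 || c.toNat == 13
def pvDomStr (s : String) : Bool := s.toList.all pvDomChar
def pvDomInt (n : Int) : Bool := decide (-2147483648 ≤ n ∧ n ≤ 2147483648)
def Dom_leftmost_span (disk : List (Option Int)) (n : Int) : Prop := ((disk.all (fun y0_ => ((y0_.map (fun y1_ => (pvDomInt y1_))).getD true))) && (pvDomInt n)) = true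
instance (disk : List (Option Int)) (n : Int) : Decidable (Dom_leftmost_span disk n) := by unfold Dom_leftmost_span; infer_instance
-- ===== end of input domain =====

-- B works in two stages over a different data structure: it first collects the
-- list of free-slot indices, then scans that index list for a run of n
-- consecutive integers (objective: alternative, same cost).

-- ===== PORT A =====
-- inner while: `while r < len(disk) and disk[r] is not None: r += 1`
def skipFull (disk : List (Option Int)) (r : Nat) : Nat :=
  if h : r < disk.length ∧ disk.getD r none ≠ none then skipFull disk (r + 1) else r
termination_by disk.length - r
decreasing_by obtain ⟨h1, -⟩ := h; omega

-- inner while: `while r < len(disk) and disk[r] is None: r += 1`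
def skipFree (disk : List (Option Int)) (r : Nat) : Nat :=
  if h : r < disk.length ∧ disk.getD r none = none then skipFree disk (r + 1) else r
termination_by disk.length - r
decreasing_by obtain ⟨h1, -⟩ := h; omega

-- termination facts for the outer loop (the port cites them in decreasing_by)
theorem skipFull_ge (disk : List (Option Int)) (r : Nat) : r ≤ skipFull disk r := by
  fun_induction skipFull disk r with
  | case1 r h ih => omega
  | case2 r h => omega

theorem skipFree_ge (disk : List (Option Int)) (r : Nat) : r ≤ skipFree disk r := by
  fun_induction skipFree disk r with
  | case1 r h ih => omega
  | case2 r h => omega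

theorem skipFull_post (disk : List (Option Int)) (r : Nat) :
    ¬(skipFull disk r < disk.length ∧ disk.getD (skipFull disk r) none ≠ none) := by
  fun_induction skipFull disk r with
  | case1 r h ih => exact ih
  | case2 r h => exact h

theorem skipFree_gt_of_none (disk : List (Option Int)) (r : Nat)
    (h1 : r < disk.length) (h2 : disk.getD r none = none) : r < skipFree disk r := by
  rw [skipFree, dif_pos ⟨h1, h2⟩]
  have := skipFree_ge disk (r + 1)
  omega

-- outer `while True` loop of A
def loopA (disk : List (Option Int)) (n : Int) (r : Nat) : Option Int :=
  let l := skipFull disk r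
  let r2 := skipFree disk l
  if (r2 : Int) - (l : Int) ≥ n then some (l : Int)
  else if hstop : disk.length ≤ r2 then none
  else loopA disk n r2
termination_by disk.length - r
decreasing_by
  have hl : l = skipFull disk r := rfl
  have hr2 : r2 = skipFree disk l := rfl
  rw [hl] at hr2
  have h1 := skipFull_ge disk r
  have h2 := skipFree_ge disk (skipFull disk r)
  by_cases h4 : skipFull disk r < disk.length ∧ disk.getD (skipFull disk r) none = none
  · have h5 := skipFree_gt_of_none disk (skipFull disk r) h4.1 h4.2
    omega
  · have h3 := skipFull_post disk r
    have h6 : disk.length ≤ skipFull disk r := by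
      by_contra hlt
      push_neg at hlt h3 h4
      exact h4 (by omega) (h3 (by omega))
    omega
def leftmost_span (disk : List (Option Int)) (n : Int) : Option Int :=
  loopA disk n 0

-- ===== PORT B =====
-- stage 1 of Source B: `free = [i for i, x in enumerate(disk) if x is None]`
def freeIdx (xs : List (Option Int)) (i : Int) : List Int :=
  match xs with
  | [] => []
  | none :: rest => i :: freeIdx rest (i + 1)
  | some _ :: rest => freeIdx rest (i + 1)

-- stage 2 of Source B: `for prev, cur in zip(free, free[1:]): …` plus the final return
def loopB (n : Int) (ps : List (Int × Int)) (start run : Int) : Option Int :=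
  match ps with
  | [] => if n ≤ run then some start else none
  | (prev, cur) :: rest =>
    if n ≤ run then some start
    else if cur = prev + 1 then loopB n rest start (run + 1)
    else loopB n rest cur 1

def leftmost_span_alt (disk : List (Option Int)) (n : Int) : Option Int :=
  match freeIdx disk 0 with
  | [] => none
  | f0 :: fs => loopB n ((f0 :: fs).zip fs) f0 1

-- ===== PRECONDITION & SPEC =====
-- For n ≤ 0 on a disk containing no None slot, A returns len(disk) (an
-- out-of-range position, an artefact of its two-pointer loop running off the
-- end), while B returns None, the intended not-found answer when no free slot exists.
def D_leftmost_span (disk : List (Option Int)) (n : Int) : Prop :=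
  n ≤ 0 ∧ ∀ x ∈ disk, x ≠ none
instance (disk : List (Option Int)) (n : Int) : Decidable (D_leftmost_span disk n) := by
  unfold D_leftmost_span; infer_instance

def Spec_leftmost_span (disk : List (Option Int)) (n : Int) (out : Option Int) : Prop :=
  ¬ D_leftmost_span disk n → out = leftmost_span_alt disk n
instance (disk : List (Option Int)) (n : Int) (out : Option Int) : Decidable (Spec_leftmost_span disk n out) := by
  unfold Spec_leftmost_span; infer_instance

def pvDiffWitness_leftmost_span : List (Option Int) × Int := ([], 0)
def pvDiffWitnessOut_leftmost_span : (Option Int) × (Option Int) := (some 0, none)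

-- ===== CLAIM (what is proved, stated in full; the proofs are below) =====
def Claim_unchanged_leftmost_span : Prop := ∀ (disk : List (Option Int)) (n : Int), Dom_leftmost_span disk n → Spec_leftmost_span disk n (leftmost_span disk n)
def Claim_changed_leftmost_span : Prop := Dom_leftmost_span (pvDiffWitness_leftmost_span.1) (pvDiffWitness_leftmost_span.2) ∧ D_leftmost_span (pvDiffWitness_leftmost_span.1) (pvDiffWitness_leftmost_span.2) ∧ leftmost_span (pvDiffWitness_leftmost_span.1) (pvDiffWitness_leftmost_span.2) = pvDiffWitnessOut_leftmost_span.1 ∧ leftmost_span_alt (pvDiffWitness_leftmost_span.1) (pvDiffWitness_leftmost_span.2) = pvDiffWitnessOut_leftmost_span.2 ∧ pvDiffWitnessOut_leftmost_span.1 ≠ pvDiffWitnessOut_leftmost_span.2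
def Claim_exact_leftmost_span : Prop := ∀ (disk : List (Option Int)) (n : Int), Dom_leftmost_span disk n → D_leftmost_span disk n → leftmost_span disk n ≠ leftmost_span_alt disk n

-- ===== LEMMAS AND PROOFS =====

-- ---- A-side lemmas ----

theorem loopA_eq (disk : List (Option Int)) (n : Int) (r : Nat) :
    loopA disk n r =
      if ((skipFree disk (skipFull disk r) : Int) - ((skipFull disk r : Nat) : Int) ≥ n) then
        some ((skipFull disk r : Nat) : Int)
      else if disk.length ≤ skipFree disk (skipFull disk r) then none
      else loopA disk n (skipFree disk (skipFull disk r)) := by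
  conv_lhs => rw [loopA.eq_def]
  rfl

theorem skipFull_cons_succ (x : Option Int) (disk : List (Option Int)) (r : Nat) :
    skipFull (x :: disk) (r + 1) = skipFull disk r + 1 := by
  fun_induction skipFull disk r with
  | case1 r h ih =>
    have hc : r + 1 < (x :: disk).length ∧ (x :: disk).getD (r + 1) none ≠ none := by
      refine ⟨by simp; omega, by simpa using h.2⟩
    rw [skipFull.eq_def, dif_pos hc, ih]
  | case2 r h =>
    have hc : ¬(r + 1 < (x :: disk).length ∧ (x :: disk).getD (r + 1) none ≠ none) := by
      intro hc
      exact h ⟨by simpa using hc.1, by simpa using hc.2⟩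
    rw [skipFull.eq_def, dif_neg hc]

theorem skipFree_cons_succ (x : Option Int) (disk : List (Option Int)) (r : Nat) :
    skipFree (x :: disk) (r + 1) = skipFree disk r + 1 := by
  fun_induction skipFree disk r with
  | case1 r h ih =>
    have hc : r + 1 < (x :: disk).length ∧ (x :: disk).getD (r + 1) none = none := by
      refine ⟨by simp; omega, by simpa using h.2⟩
    rw [skipFree.eq_def, dif_pos hc, ih]
  | case2 r h =>
    have hc : ¬(r + 1 < (x :: disk).length ∧ (x :: disk).getD (r + 1) none = none) := by
      intro hc
      exact h ⟨by simpa using hc.1, by simpa using hc.2⟩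
    rw [skipFree.eq_def, dif_neg hc]

theorem skipFull_cons_some (v : Int) (disk : List (Option Int)) :
    skipFull (some v :: disk) 0 = skipFull disk 0 + 1 := by
  rw [skipFull.eq_def, dif_pos (⟨by simp, by simp⟩ :
    0 < (some v :: disk).length ∧ (some v :: disk).getD 0 none ≠ none)]
  exact skipFull_cons_succ (some v) disk 0

theorem skipFree_zero (rest : List (Option Int)) (h : rest.head? ≠ some none) :
    skipFree rest 0 = 0 := by
  cases rest with
  | nil => rw [skipFree.eq_def]; simp
  | cons y l =>
    have hy : ¬(0 < (y :: l).length ∧ (y :: l).getD 0 none = none) := by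
      intro hc
      apply h
      have hyn : y = none := by simpa using hc.2
      simp [hyn]
    rw [skipFree.eq_def, dif_neg hy]

theorem skipFree_replicate (k : Nat) (rest : List (Option Int)) (h : rest.head? ≠ some none) :
    skipFree (List.replicate k none ++ rest) 0 = k := by
  induction k with
  | zero => simpa using skipFree_zero rest h
  | succ k ih =>
    rw [List.replicate_succ, List.cons_append]
    rw [skipFree.eq_def, dif_pos (⟨by simp, by simp⟩ :
      0 < (none :: (List.replicate k none ++ rest)).length ∧
        (none :: (List.replicate k none ++ rest)).getD 0 none = none)]
    rw [skipFree_cons_succ, ih]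

theorem skipFull_zero_none (disk : List (Option Int)) (h : disk.getD 0 none = none) :
    skipFull disk 0 = 0 := by
  rw [skipFull.eq_def, dif_neg (fun hc => hc.2 h)]

theorem loopA_nil (n : Int) (hn : 1 ≤ n) : loopA [] n 0 = none := by
  have h0 : skipFull ([] : List (Option Int)) 0 = 0 := by
    rw [skipFull.eq_def]; simp
  have h1 : skipFree ([] : List (Option Int)) 0 = 0 := by
    rw [skipFree.eq_def]; simp
  rw [loopA_eq, h0, h1, if_neg (by omega), if_pos (by simp)]

theorem loopA_shift (x : Option Int) (disk : List (Option Int)) (n : Int) (r : Nat) :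
    loopA (x :: disk) n (r + 1) = (loopA disk n r).map (· + 1) := by
  fun_induction loopA disk n r with
  | case1 r l r2 h =>
    have hl : l = skipFull disk r := rfl
    have hr2 : r2 = skipFree disk (skipFull disk r) := rfl
    rw [hl, hr2] at h
    rw [hl]
    rw [loopA_eq, skipFull_cons_succ, skipFree_cons_succ,
      if_pos (by push_cast; push_cast at h; omega)]
    simp only [Option.map_some, Option.some.injEq]
    push_cast
    ring
  | case2 r l r2 h1 h2 =>
    have hl : l = skipFull disk r := rfl
    have hr2 : r2 = skipFree disk (skipFull disk r) := rfl
    rw [hl, hr2] at h1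
    rw [hr2] at h2
    rw [loopA_eq, skipFull_cons_succ, skipFree_cons_succ,
      if_neg (by push_cast; push_cast at h1; omega), if_pos (by simp; omega)]
    simp
  | case3 r l r2 h1 h2 ih =>
    have hl : l = skipFull disk r := rfl
    have hr2 : r2 = skipFree disk (skipFull disk r) := rfl
    rw [hl, hr2] at h1
    rw [hr2] at h2
    rw [hr2]
    rw [loopA_eq, skipFull_cons_succ, skipFree_cons_succ,
      if_neg (by push_cast; push_cast at h1; omega), if_neg (by simp; omega)]
    exact ih

theorem loopA_append (disk : List (Option Int)) (n : Int) (r : Nat) (pre : List (Option Int)) :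
    loopA (pre ++ disk) n (pre.length + r) = (loopA disk n r).map (· + (pre.length : Int)) := by
  induction pre with
  | nil => simp
  | cons p ps ih =>
    have h1 : (p :: ps).length + r = (ps.length + r) + 1 := by simp; omega
    rw [h1, List.cons_append, loopA_shift, ih]
    cases loopA disk n r <;> simp <;> push_cast <;> ring

theorem loopA_cons_some (v : Int) (disk : List (Option Int)) (n : Int) :
    loopA (some v :: disk) n 0 = (loopA disk n 0).map (· + 1) := by
  rw [loopA_eq (some v :: disk), skipFull_cons_some, skipFree_cons_succ, loopA_eq disk]
  by_cases hc1 : ((skipFree disk (skipFull disk 0) : Nat) : Int) - ((skipFull disk 0 : Nat) : Int) ≥ n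
  · rw [if_pos (by push_cast; push_cast at hc1; omega), if_pos hc1]
    simp
  · rw [if_neg (by push_cast; push_cast at hc1; omega), if_neg hc1]
    by_cases hc2 : disk.length ≤ skipFree disk (skipFull disk 0)
    · rw [if_pos (by simp; omega), if_pos hc2]; simp
    · rw [if_neg (by simp; omega), if_neg hc2]
      exact loopA_shift (some v) disk n (skipFree disk (skipFull disk 0))

theorem getD_replicate_append (k : Nat) (rest : List (Option Int)) (hk : 1 ≤ k) :
    (List.replicate k none ++ rest).getD 0 none = none := by
  cases k with
  | zero => omega
  | succ k => rw [List.replicate_succ, List.cons_append]; simp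

theorem loopA_run (k : Nat) (rest : List (Option Int)) (n : Int) (hk : 1 ≤ k)
    (hr : rest.head? ≠ some none) (hn : 1 ≤ n) :
    loopA (List.replicate k none ++ rest) n 0 =
      if n ≤ (k : Int) then some 0 else (loopA rest n 0).map (· + (k : Int)) := by
  have h0 : skipFull (List.replicate k none ++ rest) 0 = 0 :=
    skipFull_zero_none _ (getD_replicate_append k rest hk)
  have h1 : skipFree (List.replicate k none ++ rest) 0 = k :=
    skipFree_replicate k rest hr
  rw [loopA_eq, h0, h1]
  by_cases hnk : n ≤ (k : Int)
  · rw [if_pos (by push_cast; omega), if_pos hnk]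
    simp
  · rw [if_neg (by push_cast; omega), if_neg hnk]
    by_cases hre : rest = []
    · subst hre
      rw [if_pos (by simp), loopA_nil n hn]
      simp
    · have hlen0 : ¬((List.replicate k none ++ rest).length ≤ k) := by
        rw [List.length_append, List.length_replicate]
        intro hcon
        exact hre (List.length_eq_zero_iff.mp (by omega))
      rw [if_neg hlen0]
      have := loopA_append rest n 0 (List.replicate k none)
      simpa using this

theorem skipFull_findIdx (disk : List (Option Int)) (h : ∃ x ∈ disk, x = none) :
    skipFull disk 0 = disk.findIdx (fun x => x.isNone) := by
  induction disk with
  | nil => simp at h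
  | cons x tl ih =>
    cases x with
    | none =>
      rw [skipFull_zero_none _ (by simp)]
      simp [List.findIdx_cons]
    | some v =>
      have htl : ∃ x ∈ tl, x = none := by
        obtain ⟨y, hy, hynone⟩ := h
        subst hynone
        exact ⟨none, by simpa using hy, rfl⟩
      rw [skipFull_cons_some, ih htl]
      simp [List.findIdx_cons]

theorem loopA_le (disk : List (Option Int)) (n : Int) (hn : n ≤ 0) (h : ∃ x ∈ disk, x = none) :
    loopA disk n 0 = some ((disk.findIdx (fun x => x.isNone) : Nat) : Int) := by
  have hge := skipFree_ge disk (skipFull disk 0)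
  rw [loopA_eq, if_pos (by push_cast; omega), skipFull_findIdx disk h]

theorem skipFull_allSome (disk : List (Option Int)) (h : ∀ x ∈ disk, x ≠ none) :
    ∀ (r : Nat), r ≤ disk.length → skipFull disk r = disk.length := by
  intro r
  fun_induction skipFull disk r with
  | case1 r hc ih => intro _; exact ih (by omega)
  | case2 r hc =>
    intro hr
    by_contra hne
    have hlt : r < disk.length := by omega
    have : disk.getD r none ≠ none := by
      rw [List.getD_eq_getElem disk none hlt]
      exact h _ (List.getElem_mem hlt)
    exact hc ⟨hlt, this⟩

theorem loopA_allSome_le (disk : List (Option Int)) (n : Int) (hn : n ≤ 0)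
    (h : ∀ x ∈ disk, x ≠ none) : loopA disk n 0 = some (disk.length : Int) := by
  have h0 : skipFull disk 0 = disk.length := skipFull_allSome disk h 0 (by omega)
  have h1 : skipFree disk disk.length = disk.length := by
    rw [skipFree.eq_def, dif_neg (by simp : ¬(disk.length < disk.length ∧ disk.getD disk.length none = none))]
  rw [loopA_eq, h0, h1, if_pos (by omega)]

theorem head?_dropWhile_ne (p : Option Int → Bool) (l : List (Option Int)) :
    ∀ y, (l.dropWhile p).head? = some y → p y = false := by
  induction l with
  | nil => intro y hy; simp at hy
  | cons a l ih =>
    intro y hy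
    rw [List.dropWhile_cons] at hy
    by_cases hpa : p a
    · rw [if_pos hpa] at hy; exact ih y hy
    · rw [if_neg hpa] at hy
      simp at hy
      subst hy
      simpa using hpa

-- ---- B-side lemmas ----

-- proof helper: loopB re-expressed with the previous index carried explicitly
def loopB' (n : Int) (p : Int) (L : List Int) (start run : Int) : Option Int :=
  match L with
  | [] => if n ≤ run then some start else none
  | cur :: rest =>
    if n ≤ run then some start
    else if cur = p + 1 then loopB' n cur rest start (run + 1)
    else loopB' n cur rest cur 1

theorem loopB_pairs (n : Int) : ∀ (L : List Int) (x start run : Int),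
    loopB n ((x :: L).zip L) start run = loopB' n x L start run := by
  intro L
  induction L with
  | nil => intro x start run; simp [loopB, loopB']
  | cons c rest ih =>
    intro x start run
    show loopB n ((x, c) :: (c :: rest).zip rest) start run = _
    simp only [loopB, loopB']
    by_cases h1 : n ≤ run
    · rw [if_pos h1, if_pos h1]
    · rw [if_neg h1, if_neg h1]
      by_cases h2 : c = x + 1
      · rw [if_pos h2, if_pos h2, ih]
      · rw [if_neg h2, if_neg h2, ih]

-- proof helper: B seen as a function of an index offset
def altAt (n : Int) (disk : List (Option Int)) (i : Int) : Option Int :=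
  match freeIdx disk i with
  | [] => none
  | f0 :: fs => loopB' n f0 fs f0 1

theorem alt_eq_altAt (disk : List (Option Int)) (n : Int) :
    leftmost_span_alt disk n = altAt n disk 0 := by
  unfold leftmost_span_alt altAt
  cases freeIdx disk 0 with
  | nil => rfl
  | cons f0 fs => exact loopB_pairs n fs f0 f0 1

theorem freeIdx_shift (xs : List (Option Int)) :
    ∀ (i c : Int), freeIdx xs (i + c) = (freeIdx xs i).map (· + c) := by
  induction xs with
  | nil => intro i c; simp [freeIdx]
  | cons x rest ih =>
    intro i c
    cases x with
    | none =>
      simp only [freeIdx, List.map_cons]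
      rw [show i + c + 1 = (i + 1) + c by ring, ih]
    | some v =>
      simp only [freeIdx]
      rw [show i + c + 1 = (i + 1) + c by ring, ih]

theorem loopB'_shift (n : Int) : ∀ (L : List Int) (p start run c : Int),
    loopB' n (p + c) (L.map (· + c)) (start + c) run = (loopB' n p L start run).map (· + c) := by
  intro L
  induction L with
  | nil =>
    intro p start run c
    simp only [List.map_nil, loopB']
    split_ifs <;> simp
  | cons cur rest ih =>
    intro p start run c
    simp only [List.map_cons, loopB']
    by_cases h1 : n ≤ run
    · rw [if_pos h1, if_pos h1]; simp
    · rw [if_neg h1, if_neg h1]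
      by_cases h2 : cur = p + 1
      · rw [if_pos (by omega), if_pos h2, ih]
      · rw [if_neg (by omega), if_neg h2, ih]

theorem altAt_shift (n : Int) (disk : List (Option Int)) (i c : Int) :
    altAt n disk (i + c) = (altAt n disk i).map (· + c) := by
  unfold altAt
  rw [freeIdx_shift]
  cases freeIdx disk i with
  | nil => simp
  | cons f0 fs =>
    simp only [List.map_cons]
    exact loopB'_shift n fs f0 f0 1 c

theorem altAt_cons_some (n v : Int) (rest : List (Option Int)) (i : Int) :
    altAt n (some v :: rest) i = altAt n rest (i + 1) := rfl

-- the consecutive block that freeIdx produces for replicate k none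
def consec (i : Int) (k : Nat) : List Int :=
  match k with
  | 0 => []
  | k + 1 => i :: consec (i + 1) k

theorem freeIdx_replicate (k : Nat) :
    ∀ (rest : List (Option Int)) (i : Int),
    freeIdx (List.replicate k none ++ rest) i = consec i k ++ freeIdx rest (i + k) := by
  induction k with
  | zero => intro rest i; simp [consec]
  | succ k ih =>
    intro rest i
    rw [List.replicate_succ, List.cons_append]
    simp only [freeIdx, consec, List.cons_append]
    rw [ih rest (i + 1),
      show (i + 1) + ((k : Nat) : Int) = i + (((k : Nat) + 1 : Nat) : Int) by push_cast; ring]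

theorem loopB'_hit (n p start run : Int) (L : List Int) (h : n ≤ run) :
    loopB' n p L start run = some start := by
  cases L <;> simp [loopB', if_pos h]

theorem loopB'_consec (n : Int) (F : List Int) :
    ∀ (k : Nat) (p start run : Int), 1 ≤ run →
    loopB' n p (consec (p + 1) k ++ F) start run =
      if n ≤ run + (k : Int) then some start else loopB' n (p + k) F start (run + k) := by
  intro k
  induction k with
  | zero =>
    intro p start run h1
    simp only [consec, List.nil_append, Nat.cast_zero, add_zero]
    by_cases h : n ≤ run
    · rw [if_pos h, loopB'_hit n p start run F h]
    · rw [if_neg h]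
  | succ k ih =>
    intro p start run h1
    simp only [consec, List.cons_append, loopB']
    by_cases h : n ≤ run
    · rw [if_pos h, if_pos (by push_cast; omega)]
    · rw [if_neg h, if_pos trivial, ih (p + 1) start (run + 1) (by omega)]
      by_cases h2 : n ≤ run + ((k : Nat) + 1 : Nat)
      · rw [if_pos (by push_cast; push_cast at h2; omega), if_pos h2]
      · rw [if_neg (by push_cast; push_cast at h2; omega), if_neg h2]
        congr 1 <;> push_cast <;> ring

theorem freeIdx_mem_ge (xs : List (Option Int)) :
    ∀ (i x : Int), x ∈ freeIdx xs i → i ≤ x := by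
  induction xs with
  | nil => intro i x hx; simp [freeIdx] at hx
  | cons y rest ih =>
    intro i x hx
    cases y with
    | none =>
      simp only [freeIdx, List.mem_cons] at hx
      rcases hx with rfl | hx
      · omega
      · have := ih (i + 1) x hx; omega
    | some v =>
      have := ih (i + 1) x (by simpa [freeIdx] using hx); omega

theorem freeIdx_head_gt (rest : List (Option Int)) (j f0 : Int)
    (hr : rest.head? ≠ some none) (hh : (freeIdx rest j).head? = some f0) : j + 1 ≤ f0 := by
  cases rest with
  | nil => simp [freeIdx] at hh
  | cons y l =>
    cases y with
    | none => exact absurd rfl hr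
    | some v =>
      have hmem : f0 ∈ freeIdx l (j + 1) := by
        have : f0 ∈ freeIdx (some v :: l) j := List.mem_of_mem_head? hh
        simpa [freeIdx] using this
      exact freeIdx_mem_ge l (j + 1) f0 hmem

theorem altAt_run (n : Int) (k : Nat) (rest : List (Option Int)) (i : Int) (hk : 1 ≤ k)
    (hr : rest.head? ≠ some none) :
    altAt n (List.replicate k none ++ rest) i =
      if n ≤ (k : Int) then some i else altAt n rest (i + k) := by
  obtain ⟨k', rfl⟩ : ∃ k', k = k' + 1 := ⟨k - 1, by omega⟩
  unfold altAt
  rw [freeIdx_replicate]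
  simp only [consec, List.cons_append]
  have hcast : i + 1 + (k' : Int) = i + ((k' : Nat) + 1 : Nat) := by push_cast; ring
  rw [loopB'_consec n (freeIdx rest (i + ((k' : Nat) + 1 : Nat))) k' i i 1 (by omega)]
  by_cases h2 : n ≤ (1 : Int) + k'
  · rw [if_pos h2, if_pos (by push_cast; push_cast at h2; omega)]
  · rw [if_neg h2, if_neg (by push_cast; push_cast at h2; omega)]
    cases hF : freeIdx rest (i + ((k' : Nat) + 1 : Nat)) with
    | nil => simp [loopB', if_neg h2]
    | cons f0 fs =>
      have hgt : (i + ((k' : Nat) + 1 : Nat)) + 1 ≤ f0 :=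
        freeIdx_head_gt rest _ f0 hr (by rw [hF]; rfl)
      simp only [loopB']
      rw [if_neg h2, if_neg (by push_cast at hgt ⊢; omega)]

theorem freeIdx_head_findIdx (disk : List (Option Int)) (h : ∃ x ∈ disk, x = none) :
    ∀ (i : Int), (freeIdx disk i).head? = some (i + ((disk.findIdx (fun x => x.isNone) : Nat) : Int)) := by
  induction disk with
  | nil => simp at h
  | cons x tl ih =>
    intro i
    cases x with
    | none => simp [freeIdx, List.findIdx_cons]
    | some v =>
      have htl : ∃ y ∈ tl, y = none := by
        obtain ⟨y, hy, hynone⟩ := h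
        subst hynone
        exact ⟨none, by simpa using hy, rfl⟩
      simp only [freeIdx]
      rw [ih htl (i + 1)]
      congr 1
      simp [List.findIdx_cons]
      push_cast
      ring

theorem altAt_le (n : Int) (hn : n ≤ 1) (disk : List (Option Int))
    (h : ∃ x ∈ disk, x = none) (i : Int) :
    altAt n disk i = some (i + ((disk.findIdx (fun x => x.isNone) : Nat) : Int)) := by
  unfold altAt
  have hh := freeIdx_head_findIdx disk h i
  cases hF : freeIdx disk i with
  | nil => rw [hF] at hh; simp at hh
  | cons f0 fs =>
    rw [hF] at hh
    simp only [List.head?_cons, Option.some.injEq] at hh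
    show loopB' n f0 fs f0 1 = some (i + ((disk.findIdx (fun x => x.isNone) : Nat) : Int))
    rw [loopB'_hit n f0 f0 1 fs hn, hh]

theorem freeIdx_allSome (disk : List (Option Int)) (h : ∀ x ∈ disk, x ≠ none) :
    ∀ (i : Int), freeIdx disk i = [] := by
  induction disk with
  | nil => intro i; simp [freeIdx]
  | cons x tl ih =>
    intro i
    cases x with
    | none => exact absurd rfl (h none (by simp))
    | some v =>
      simp only [freeIdx]
      exact ih (fun y hy => h y (by simp [hy])) (i + 1)

theorem altAt_allSome (n : Int) (disk : List (Option Int)) (h : ∀ x ∈ disk, x ≠ none) (i : Int) :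
    altAt n disk i = none := by
  unfold altAt
  rw [freeIdx_allSome disk h i]

-- ---- main equivalence for n ≥ 1 ----

theorem main_pos (n : Int) (hn : 1 ≤ n) :
    ∀ (disk : List (Option Int)), loopA disk n 0 = altAt n disk 0 := by
  have H : ∀ (N : Nat) (disk : List (Option Int)), disk.length ≤ N →
      loopA disk n 0 = altAt n disk 0 := by
    intro N
    induction N with
    | zero =>
      intro disk hlen
      have : disk = [] := List.eq_nil_of_length_eq_zero (by omega)
      subst this
      rw [loopA_nil n hn]
      simp [altAt, freeIdx]
    | succ N ih =>
      intro disk hlen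
      match disk with
      | [] =>
        rw [loopA_nil n hn]; simp [altAt, freeIdx]
      | some v :: rest =>
        rw [loopA_cons_some, altAt_cons_some, show (0 : Int) + 1 = 0 + 1 from rfl,
          altAt_shift n rest 0 1, ih rest (by simpa using hlen)]
      | none :: tl =>
        have hw := List.takeWhile_append_dropWhile (p := fun x : Option Int => x.isNone) (l := none :: tl)
        set t := (none :: tl).takeWhile (fun x : Option Int => x.isNone) with ht
        set rest := (none :: tl).dropWhile (fun x : Option Int => x.isNone) with hrest
        have h2 : t = List.replicate t.length none := by
          rw [List.eq_replicate_iff]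
          refine ⟨rfl, fun b hb => ?_⟩
          have := List.mem_takeWhile_imp (ht ▸ hb)
          simpa [Option.isNone_iff_eq_none] using this
        have h3 : 1 ≤ t.length := by
          rw [ht]
          simp [List.takeWhile_cons]
        have h4 : rest.head? ≠ some none := by
          intro hc
          have := head?_dropWhile_ne (fun x : Option Int => x.isNone) (none :: tl) none (hrest ▸ hc)
          simp at this
        have h5 : rest.length ≤ N := by
          have hlen2 : t.length + rest.length = (none :: tl).length := by
            rw [← List.length_append, hw]
          simp at hlen2
          simp at hlen
          omega
        rw [← hw, h2, loopA_run t.length rest n h3 h4 hn,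
          altAt_run n t.length rest 0 h3 h4]
        by_cases hnk : n ≤ (t.length : Int)
        · rw [if_pos hnk, if_pos hnk]
        · rw [if_neg hnk, if_neg hnk, show (0 : Int) + (t.length : Int) = 0 + (t.length : Int) from rfl,
            altAt_shift n rest 0 (t.length : Int), ih rest h5]
  intro disk
  exact H disk.length disk le_rfl

-- ===== VERDICT (by name: the statement is the Claim_ definition above) =====
theorem leftmost_span_spec : Claim_unchanged_leftmost_span := by
  intro disk n _ hnD
  unfold D_leftmost_span at hnD
  show leftmost_span disk n = leftmost_span_alt disk n
  unfold leftmost_span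
  rw [alt_eq_altAt]
  by_cases h1 : 1 ≤ n
  · exact main_pos n h1 disk
  · have hn0 : n ≤ 0 := by omega
    have hex : ∃ x ∈ disk, x = none := by
      by_contra hno
      push_neg at hno
      exact hnD ⟨hn0, hno⟩
    rw [loopA_le disk n hn0 hex, altAt_le n (by omega) disk hex 0]
    simp

theorem leftmost_span_changed : Claim_changed_leftmost_span := by
  unfold Claim_changed_leftmost_span
  refine ⟨by decide, by decide, ?_, by decide, by decide⟩
  show leftmost_span [] 0 = some 0
  unfold leftmost_span
  have h0 : skipFull ([] : List (Option Int)) 0 = 0 := by rw [skipFull.eq_def]; simp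
  have h1 : skipFree ([] : List (Option Int)) 0 = 0 := by rw [skipFree.eq_def]; simp
  rw [loopA_eq, h0, h1, if_pos (by norm_num)]
  rfl

theorem leftmost_span_tight : Claim_exact_leftmost_span := by
  intro disk n _ hD
  unfold D_leftmost_span at hD
  obtain ⟨hn0, hall⟩ := hD
  unfold leftmost_span
  rw [alt_eq_altAt, loopA_allSome_le disk n hn0 hall, altAt_allSome n disk hall 0]
  simp
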